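-- pv_equiv track=rewrite | github.com/HackaTUM-2023-MACP/Sports-NVS | backend-flask-server/query_generator.py | combine_messages
-- ===== SOURCE A (Python) =====
-- def combine_messages(user_content_list, assistant_content_list):
--     conversation_sql_query = [{"role": "system", "content": "You are only allowed to reply with an SQL query. For filtering, only use fuzzy matching and never include the message in the query. The database table has the following columns: timestamp TIMESTAMP, machine VARCHAR(255), layer VARCHAR(255), message TEXT, message_vector vector(768). "}]
--     conversation_reference_message = [{"role": "system", "content": "Please reply only with a possible message that we should look for in a system logfile to find the answers to the user's prompt."}]
--
--     for i in range(max(len(user_content_list), len(assistant_content_list))):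
--         if i < len(user_content_list):
--             conversation_sql_query.append({"role": "user", "content": user_content_list[i]})
--             conversation_reference_message.append({"role": "user", "content": user_content_list[i]})
--         if i < len(assistant_content_list):
--             conversation_sql_query.append({"role": "assistant", "content": assistant_content_list[i]})
--             conversation_reference_message.append({"role": "assistant", "content": assistant_content_list[i]})
--
--     return conversation_sql_query, conversation_reference_message
-- ===== SOURCE B (Python) =====
-- SQL_SYSTEM_CONTENT = "You are only allowed to reply with an SQL query. For filtering, only use fuzzy matching and never include the message in the query. The database table has the following columns: timestamp TIMESTAMP, machine VARCHAR(255), layer VARCHAR(255), message TEXT, message_vector vector(768). "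
-- REFERENCE_SYSTEM_CONTENT = "Please reply only with a possible message that we should look for in a system logfile to find the answers to the user's prompt."
--
--
-- def _interleave(users, assistants):
--     """One shared interleaved message list: zip the common prefix, then the leftover tail."""
--     messages = []
--     for u, a in zip(users, assistants):
--         messages.append({"role": "user", "content": u})
--         messages.append({"role": "assistant", "content": a})
--     n = min(len(users), len(assistants))
--     for u in users[n:]:
--         messages.append({"role": "user", "content": u})
--     for a in assistants[n:]:
--         messages.append({"role": "assistant", "content": a})
--     return messages
--
--
-- def combine_messages(user_content_list, assistant_content_list):
--     messages = _interleave(user_content_list, assistant_content_list)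
--     return ([{"role": "system", "content": SQL_SYSTEM_CONTENT}] + messages,
--             [{"role": "system", "content": REFERENCE_SYSTEM_CONTENT}] + messages)
-- ===== Notes on version B (the rewrite author's own statement) =====
-- stated objective: simpler
-- what changed: The shared interleaved message list is built once (zip over the common prefix, then the leftover tail of the longer list) instead of an index loop over range(max(len,len)) with per-index bound checks duplicated into two parallel accumulators; the two returns are then assembled by prepending the two distinct system dicts to that single list.
import Mathlib
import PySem

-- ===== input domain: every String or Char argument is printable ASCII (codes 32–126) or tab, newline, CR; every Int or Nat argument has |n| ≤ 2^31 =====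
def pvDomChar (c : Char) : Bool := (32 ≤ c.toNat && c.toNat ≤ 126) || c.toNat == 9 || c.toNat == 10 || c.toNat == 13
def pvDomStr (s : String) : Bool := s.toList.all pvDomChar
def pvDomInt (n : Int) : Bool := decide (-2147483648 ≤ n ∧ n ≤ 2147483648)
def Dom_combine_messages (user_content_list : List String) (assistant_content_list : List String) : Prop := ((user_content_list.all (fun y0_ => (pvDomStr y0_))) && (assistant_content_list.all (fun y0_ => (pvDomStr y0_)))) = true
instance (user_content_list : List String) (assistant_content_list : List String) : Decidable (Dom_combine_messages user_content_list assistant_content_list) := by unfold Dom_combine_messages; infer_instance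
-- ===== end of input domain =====

-- B (simpler): builds the shared interleaved message list once (zip of the common prefix, then the leftover tail)
-- and prepends the two distinct system dicts, instead of A's index loop duplicating appends into two parallel lists.
-- ===== PORT A =====
-- equivalence is about the RETURN VALUE; B rebuilds the same RETURN VALUE; A's in-place appends to its two fresh local lists are not observable by the caller.
def pvSqlContent : String := "You are only allowed to reply with an SQL query. For filtering, only use fuzzy matching and never include the message in the query. The database table has the following columns: timestamp TIMESTAMP, machine VARCHAR(255), layer VARCHAR(255), message TEXT, message_vector vector(768). "
def pvRefContent : String := "Please reply only with a possible message that we should look for in a system logfile to find the answers to the user's prompt."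

def combine_messages (user_content_list : List String) (assistant_content_list : List String) : (List (List (String × String))) × (List (List (String × String))) :=
  let conversation_sql_query : List (List (String × String)) := [[("role", "system"), ("content", pvSqlContent)]]
  let conversation_reference_message : List (List (String × String)) := [[("role", "system"), ("content", pvRefContent)]]
  let st := (PySem.List.pyRange 0 (max user_content_list.length assistant_content_list.length) 1).foldl
    (fun (st : (List (List (String × String))) × (List (List (String × String)))) i =>
      let st := if i < (user_content_list.length : Int) then
          (st.1 ++ [[("role", "user"), ("content", PySem.List.pyGetD user_content_list i "")]],
           st.2 ++ [[("role", "user"), ("content", PySem.List.pyGetD user_content_list i "")]])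
        else st
      let st := if i < (assistant_content_list.length : Int) then
          (st.1 ++ [[("role", "assistant"), ("content", PySem.List.pyGetD assistant_content_list i "")]],
           st.2 ++ [[("role", "assistant"), ("content", PySem.List.pyGetD assistant_content_list i "")]])
        else st
      st)
    (conversation_sql_query, conversation_reference_message)
  st

-- ===== PORT B =====
def interleaveMsgs (users assistants : List String) : List (List (String × String)) :=
  let n := min users.length assistants.length
  (users.zip assistants).flatMap
      (fun p => [[("role", "user"), ("content", p.1)], [("role", "assistant"), ("content", p.2)]])
    ++ (users.drop n).map (fun u => [("role", "user"), ("content", u)])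
    ++ (assistants.drop n).map (fun a => [("role", "assistant"), ("content", a)])

def combine_messages_alt (user_content_list : List String) (assistant_content_list : List String) : (List (List (String × String))) × (List (List (String × String))) :=
  let messages := interleaveMsgs user_content_list assistant_content_list
  ([[("role", "system"), ("content", pvSqlContent)]] ++ messages,
   [[("role", "system"), ("content", pvRefContent)]] ++ messages)

-- ===== PRECONDITION & SPEC =====
def Spec_combine_messages (user_content_list : List String) (assistant_content_list : List String) (out : (List (List (String × String))) × (List (List (String × String)))) : Prop := out = combine_messages_alt user_content_list assistant_content_list
instance (user_content_list : List String) (assistant_content_list : List String) (out : (List (List (String × String))) × (List (List (String × String)))) : Decidable (Spec_combine_messages user_content_list assistant_content_list out) := by unfold Spec_combine_messages; infer_instance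

-- ===== CLAIM (what is proved, stated in full; the proofs are below) =====
def Claim_equal_combine_messages : Prop := ∀ (user_content_list : List String) (assistant_content_list : List String), Dom_combine_messages user_content_list assistant_content_list → Spec_combine_messages user_content_list assistant_content_list (combine_messages user_content_list assistant_content_list)

-- ===== LEMMAS AND PROOFS =====

-- ===== VERDICT (by name: the statement is the Claim_ definition above) =====
-- per-index contribution of A's loop body (Int-indexed, then Nat-indexed)
def pvStepInt (u a : List String) (i : Int) : List (List (String × String)) :=
  (if i < (u.length : Int) then [[("role", "user"), ("content", PySem.List.pyGetD u i "")]] else []) ++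
  (if i < (a.length : Int) then [[("role", "assistant"), ("content", PySem.List.pyGetD a i "")]] else [])

def pvStep (u a : List String) (k : Nat) : List (List (String × String)) :=
  (if k < u.length then [[("role", "user"), ("content", u.getD k "")]] else []) ++
  (if k < a.length then [[("role", "assistant"), ("content", a.getD k "")]] else [])

theorem foldl_pair_append {α ι : Type} (g : ι → List α) :
    ∀ (r : List ι) (s1 s2 : List α),
      r.foldl (fun st i => (st.1 ++ g i, st.2 ++ g i)) (s1, s2) = (s1 ++ r.flatMap g, s2 ++ r.flatMap g) := by
  intro r
  induction r with
  | nil => simp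
  | cons i r ih => intro s1 s2; simp [List.foldl_cons, ih]

theorem flatMap_range_interleave :
    ∀ (u a : List String),
      (List.range (max u.length a.length)).flatMap (pvStep u a) = interleaveMsgs u a := by
  intro u
  induction u with
  | nil =>
    intro a
    induction a with
    | nil => simp [interleaveMsgs]
    | cons b bs ihb =>
      simp only [List.length_nil, Nat.zero_max] at ihb ⊢
      simp only [List.length_cons, List.range_succ_eq_map, List.flatMap_cons, List.flatMap_map]
      rw [show ((List.range bs.length).flatMap fun k => pvStep [] (b :: bs) (k + 1)) =
          (List.range bs.length).flatMap (pvStep [] bs) from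
        List.flatMap_congr (fun k _ => by simp [pvStep]), ihb]
      simp [pvStep, interleaveMsgs]
  | cons x us ihu =>
    intro a
    cases a with
    | nil =>
      have hthis := ihu []
      simp only [List.length_nil, Nat.max_zero] at hthis
      simp only [List.length_cons, List.length_nil, Nat.max_zero,
        List.range_succ_eq_map, List.flatMap_cons, List.flatMap_map]
      rw [show ((List.range us.length).flatMap fun k => pvStep (x :: us) [] (k + 1)) =
          (List.range us.length).flatMap (pvStep us []) from
        List.flatMap_congr (fun k _ => by simp [pvStep]), hthis]
      simp [pvStep, interleaveMsgs]
    | cons b bs =>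
      simp only [List.length_cons]
      rw [show max (us.length + 1) (bs.length + 1) = max us.length bs.length + 1 from by omega]
      simp only [List.range_succ_eq_map, List.flatMap_cons, List.flatMap_map]
      rw [show ((List.range (max us.length bs.length)).flatMap fun k => pvStep (x :: us) (b :: bs) (k + 1)) =
          (List.range (max us.length bs.length)).flatMap (pvStep us bs) from
        List.flatMap_congr (fun k _ => by simp [pvStep])]
      simp [ihu bs, pvStep, interleaveMsgs]

theorem combine_messages_spec : Claim_equal_combine_messages := by
  unfold Claim_equal_combine_messages
  intro u a _
  unfold Spec_combine_messages combine_messages combine_messages_alt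
  dsimp only
  rw [← Nat.cast_max, PySem.List.pyRange_zero_natCast]
  have hstep : (fun (st : (List (List (String × String))) × (List (List (String × String)))) (i : Int) =>
      let st := if i < (u.length : Int) then
          (st.1 ++ [[("role", "user"), ("content", PySem.List.pyGetD u i "")]],
           st.2 ++ [[("role", "user"), ("content", PySem.List.pyGetD u i "")]])
        else st
      let st := if i < (a.length : Int) then
          (st.1 ++ [[("role", "assistant"), ("content", PySem.List.pyGetD a i "")]],
           st.2 ++ [[("role", "assistant"), ("content", PySem.List.pyGetD a i "")]])
        else st
      st) = (fun st i => (st.1 ++ pvStepInt u a i, st.2 ++ pvStepInt u a i)) := by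
    funext st i
    simp only [pvStepInt]
    split_ifs <;> simp
  rw [hstep, List.foldl_map, show (fun (st : (List (List (String × String))) × (List (List (String × String)))) (k : Nat) =>
        (st.1 ++ pvStepInt u a (k : Int), st.2 ++ pvStepInt u a (k : Int))) =
      (fun st k => (st.1 ++ pvStep u a k, st.2 ++ pvStep u a k)) from
    funext fun st => funext fun k => by simp [pvStepInt, pvStep],
    foldl_pair_append, flatMap_range_interleave]
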